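-- pv_equiv track=rewrite | github.com/justinlcochran/aoc | day5/day5.py | map_const
-- ===== SOURCE A (Python) =====
-- def map_const(f):
--     current_mapping = ''
--     map_dict = {
--         'seed-to-soil': [],
--         'soil-to-fertilizer': [],
--         'fertilizer-to-water': [],
--         'water-to-light': [],
--         'light-to-temperature': [],
--         'temperature-to-humidity': [],
--         'humidity-to-location': []
--     }
--
--     for line in f[2:]:
--         if ":" in line:
--             current_mapping = line.replace(' map:', '').strip()
--         elif line == "":
--             pass
--         else:
--             map_dict[current_mapping].append(line.split())
--     return map_dict
-- ===== SOURCE B (Python) =====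
-- def map_const(f):
--     keys = ['seed-to-soil', 'soil-to-fertilizer', 'fertilizer-to-water',
--             'water-to-light', 'light-to-temperature', 'temperature-to-humidity',
--             'humidity-to-location']
--     # pass 1: tag every line of f[2:] with its governing section header
--     tagged = []
--     cur = ''
--     for line in f[2:]:
--         if ':' in line:
--             cur = line.replace(' map:', '').strip()
--         tagged.append((cur, line))
--     # pass 2: one comprehension per fixed key
--     return {k: [line.split() for c, line in tagged
--                 if c == k and line != '' and ':' not in line]
--             for k in keys}
-- ===== Notes on version B (the rewrite author's own statement) =====
-- stated objective: alternative
-- what changed: A threads a current_mapping through one stateful scan that mutates the pre-initialized dict line by line; B first tags every line of f[2:] with its governing header in one pass and then builds the result with one per-key comprehension over the tagged list, never mutating a dict.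
import Mathlib
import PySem

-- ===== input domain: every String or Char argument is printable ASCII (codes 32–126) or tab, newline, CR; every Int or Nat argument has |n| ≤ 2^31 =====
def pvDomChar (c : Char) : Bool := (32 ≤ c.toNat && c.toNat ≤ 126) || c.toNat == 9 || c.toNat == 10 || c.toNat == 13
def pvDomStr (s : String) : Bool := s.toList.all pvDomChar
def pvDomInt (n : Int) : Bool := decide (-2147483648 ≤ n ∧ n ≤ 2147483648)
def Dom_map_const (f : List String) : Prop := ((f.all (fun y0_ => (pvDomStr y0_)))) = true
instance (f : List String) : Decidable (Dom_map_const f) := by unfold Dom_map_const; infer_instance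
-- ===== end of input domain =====

-- B replaces A's single stateful scan that mutates a dict by a tag-then-group decomposition
-- (tag each line with its governing header, then one comprehension per fixed key); alternative, not faster.

-- the seven fixed section names (the dict's pre-initialized keys, shared by both Pythons)
def pvKeys : List String :=
  ["seed-to-soil", "soil-to-fertilizer", "fertilizer-to-water", "water-to-light",
   "light-to-temperature", "temperature-to-humidity", "humidity-to-location"]

-- line.replace(' map:', '').strip()  (appears verbatim in both Pythons)
def pvHdr (line : String) : String := PySem.Str.strip (PySem.Str.replace line " map:" "")

-- ===== PORT A =====
-- the loop body of A; 'map_dict[current_mapping].append(...)' raises KeyError when the key is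
-- absent — exactly the inputs Pre_map_const excludes, so Dict.modify's insert branch is never
-- reached on admitted inputs.
def pvStepA (st : String × PySem.Dict String (List (List String))) (line : String) :
    String × PySem.Dict String (List (List String)) :=
  if PySem.Str.isIn ":" line then (pvHdr line, st.2)
  else if line = "" then st
  else (st.1, st.2.modify st.1 [] (fun rows => rows ++ [PySem.Str.split₀ line]))

def map_const (f : List String) : List (String × List (List String)) :=
  ((PySem.List.slice f (some 2)).foldl pvStepA
    ("", PySem.Dict.ofList (pvKeys.map (fun k => (k, ([] : List (List String))))))).2.items

-- ===== PORT B =====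
-- pass 1 of B: thread cur and append (cur, line)
def pvStepB (st : String × List (String × String)) (line : String) :
    String × List (String × String) :=
  let cur := if PySem.Str.isIn ":" line then pvHdr line else st.1
  (cur, st.2 ++ [(cur, line)])

def map_const_alt (f : List String) : List (String × List (List String)) :=
  let tagged := ((PySem.List.slice f (some 2)).foldl pvStepB ("", [])).2
  pvKeys.map (fun k => (k,
    (tagged.filter (fun p => p.1 == k && p.2 != "" && !(PySem.Str.isIn ":" p.2))).map
      (fun p => PySem.Str.split₀ p.2)))

-- ===== PRECONDITION & SPEC =====
-- Pre_ excludes exactly the inputs on which A raises KeyError: a non-blank, non-':' data line in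
-- f[2:] that is not governed by a most recent preceding header line whose derived key is one of
-- the seven fixed keys.
def Pre_map_const (f : List String) : Prop :=
  ∀ i < (f.drop 2).length,
    ((f.drop 2).getD i "" ≠ "" ∧ PySem.Str.isIn ":" ((f.drop 2).getD i "") = false) →
    ∃ j < i, PySem.Str.isIn ":" ((f.drop 2).getD j "") = true ∧
      pvHdr ((f.drop 2).getD j "") ∈ pvKeys ∧
      ∀ k < i, j < k → PySem.Str.isIn ":" ((f.drop 2).getD k "") = false
instance (f : List String) : Decidable (Pre_map_const f) := by unfold Pre_map_const; infer_instance

def pvWitness_map_const : List String :=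
  ["seeds: 79 14", "", "seed-to-soil map:", "50 98 2", "", "soil-to-fertilizer map:", "0 15 37"]

def Spec_map_const (f : List String) (out : List (String × List (List String))) : Prop := out = map_const_alt f
instance (f : List String) (out : List (String × List (List String))) : Decidable (Spec_map_const f out) := by unfold Spec_map_const; infer_instance

-- ===== CLAIM (what is proved, stated in full; the proofs are below) =====
def Claim_equal_map_const : Prop := ∀ (f : List String), Dom_map_const f → Pre_map_const f → Spec_map_const f (map_const f)

-- ===== LEMMAS AND PROOFS =====

-- tagged list built by B's first pass, as a structural recursion
def pvTag (c : String) : List String → List (String × String)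
  | [] => []
  | x :: xs =>
    (if PySem.Str.isIn ":" x then pvHdr x else c, x) ::
      pvTag (if PySem.Str.isIn ":" x then pvHdr x else c) xs

-- rows that end up under key k (B's per-key comprehension over the tagged list)
def pvRows (k c : String) (l : List String) : List (List String) :=
  ((pvTag c l).filter (fun p => p.1 == k && p.2 != "" && !(PySem.Str.isIn ":" p.2))).map
    (fun p => PySem.Str.split₀ p.2)

-- "A does not raise": every data line's governing section name is one of the seven keys
def pvOk (c : String) : List String → Prop
  | [] => True
  | x :: xs =>
    if PySem.Str.isIn ":" x then pvOk (pvHdr x) xs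
    else if x = "" then pvOk c xs
    else c ∈ pvKeys ∧ pvOk c xs

lemma pvTagB (l : List String) : ∀ (c : String) (acc : List (String × String)),
    (l.foldl pvStepB (c, acc)).2 = acc ++ pvTag c l := by
  induction l with
  | nil => intro c acc; simp [pvTag]
  | cons x xs ih =>
    intro c acc
    simp only [List.foldl_cons, pvStepB, pvTag]
    rw [ih]
    simp

lemma pvGetShape (ks : List String) (v : String → List (List String)) (c : String)
    (hc : c ∈ ks) (hnd : ks.Nodup) :
    (PySem.Dict.mk (ks.map (fun k => (k, v k)))).get? c = some (v c) := by
  induction ks with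
  | nil => cases hc
  | cons a t ih =>
    simp only [List.map_cons, PySem.Dict.get?_mk_cons]
    rcases List.mem_cons.mp hc with h | h
    · subst h; simp
    · have hne : a ≠ c := fun he => (List.nodup_cons.mp hnd).1 (he ▸ h)
      simp only [List.nodup_cons] at hnd
      rw [if_neg (by simpa using hne)]
      exact ih h hnd.2

lemma pvModifyShape (ks : List String) (v : String → List (List String)) (c : String)
    (g : List (List String) → List (List String)) (hc : c ∈ ks) (hnd : ks.Nodup) :
    (PySem.Dict.mk (ks.map (fun k => (k, v k)))).modify c [] g
      = PySem.Dict.mk (ks.map (fun k => (k, if k = c then g (v c) else v k))) := by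
  have hget := pvGetShape ks v c hc hnd
  have hcont : (PySem.Dict.mk (ks.map (fun k => (k, v k)))).contains c = true := by
    rw [PySem.Dict.contains_eq_isSome_get?, hget]; rfl
  apply PySem.Dict.ext
  rw [PySem.Dict.modify, PySem.Dict.getD_of_get?_eq_some _ [] hget,
      PySem.Dict.items_insert_of_contains _ _ hcont]
  show (ks.map (fun k => (k, v k))).map _ = _
  rw [List.map_map]
  refine List.map_congr_left (fun k hk => ?_)
  by_cases hkc : k = c
  · subst hkc; simp
  · simp [hkc]

lemma pvTag_hdr (c x : String) (xs : List String) (hx : PySem.Str.isIn ":" x = true) :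
    pvTag c (x :: xs) = (pvHdr x, x) :: pvTag (pvHdr x) xs := by
  have hx2 : PySem.Chars.isIn [':'] x.toList = true := by simpa using hx
  simp [pvTag, hx2]

lemma pvTag_other (c x : String) (xs : List String) (hx : PySem.Str.isIn ":" x = false) :
    pvTag c (x :: xs) = (c, x) :: pvTag c xs := by
  have hx2 : PySem.Chars.isIn [':'] x.toList = false := by simpa using hx
  simp [pvTag, hx2]

lemma pvRows_hdr (k c x : String) (xs : List String) (hx : PySem.Str.isIn ":" x = true) :
    pvRows k c (x :: xs) = pvRows k (pvHdr x) xs := by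
  have hx2 : PySem.Chars.isIn [':'] x.toList = true := by simpa using hx
  simp [pvRows, pvTag_hdr c x xs hx, List.filter_cons, hx2]

lemma pvRows_blank (k c : String) (xs : List String) :
    pvRows k c ("" :: xs) = pvRows k c xs := by
  rw [pvRows, pvTag_other c "" xs (by decide)]
  simp [pvRows, List.filter_cons]

lemma pvRows_data (k c x : String) (xs : List String) (hx : PySem.Str.isIn ":" x = false)
    (hxe : x ≠ "") :
    pvRows k c (x :: xs)
      = (if c = k then [PySem.Str.split₀ x] else []) ++ pvRows k c xs := by
  have hx2 : PySem.Chars.isIn [':'] x.toList = false := by simpa using hx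
  rw [pvRows, pvTag_other c x xs hx]
  by_cases hck : c = k
  · simp [pvRows, List.filter_cons, hck, hx2, hxe]
  · simp [pvRows, List.filter_cons, hck, hx2, hxe]

lemma pvStepA_hdr (st : String × PySem.Dict String (List (List String))) (x : String)
    (hx : PySem.Str.isIn ":" x = true) : pvStepA st x = (pvHdr x, st.2) := by
  have hx2 : PySem.Chars.isIn [':'] x.toList = true := by simpa using hx
  simp [pvStepA, hx2]

lemma pvStepA_blank (st : String × PySem.Dict String (List (List String))) :
    pvStepA st "" = st := by
  have h : PySem.Chars.isIn [':'] ([] : List Char) = false := by decide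
  simp [pvStepA, h]

lemma pvStepA_data (st : String × PySem.Dict String (List (List String))) (x : String)
    (hx : PySem.Str.isIn ":" x = false) (hxe : x ≠ "") :
    pvStepA st x = (st.1, st.2.modify st.1 [] (fun rows => rows ++ [PySem.Str.split₀ x])) := by
  have hx2 : PySem.Chars.isIn [':'] x.toList = false := by simpa using hx
  simp [pvStepA, hx2, hxe]

lemma pvInvA (l : List String) : ∀ (c : String) (v : String → List (List String)),
    pvOk c l →
    ((l.foldl pvStepA (c, PySem.Dict.mk (pvKeys.map (fun k => (k, v k))))).2).items
      = pvKeys.map (fun k => (k, v k ++ pvRows k c l)) := by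
  induction l with
  | nil =>
    intro c v _
    simp [pvRows, pvTag, PySem.Dict.items]
  | cons x xs ih =>
    intro c v hok
    by_cases hx : PySem.Str.isIn ":" x = true
    · simp only [pvOk, hx, if_true] at hok
      rw [List.foldl_cons, pvStepA_hdr _ x hx, ih (pvHdr x) v hok]
      exact List.map_congr_left (fun k _ => by rw [pvRows_hdr k c x xs hx])
    · have hx' : PySem.Str.isIn ":" x = false := by simpa using hx
      by_cases hxe : x = ""
      · subst hxe
        simp only [pvOk, hx', Bool.false_eq_true, if_false, if_pos rfl] at hok
        rw [List.foldl_cons, pvStepA_blank, ih c v hok]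
        exact List.map_congr_left (fun k _ => by rw [pvRows_blank k c xs])
      · simp only [pvOk, hx', Bool.false_eq_true, if_false, if_neg hxe] at hok
        obtain ⟨hmem, hok⟩ := hok
        rw [List.foldl_cons, pvStepA_data _ x hx' hxe]
        show (List.foldl pvStepA
            (c, (PySem.Dict.mk (pvKeys.map (fun k => (k, v k)))).modify c []
              (fun rows => rows ++ [PySem.Str.split₀ x])) xs).2.items = _
        rw [pvModifyShape pvKeys v c _ hmem (by decide), ih c _ hok]
        refine List.map_congr_left (fun k _ => ?_)
        rw [pvRows_data k c x xs hx' hxe]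
        by_cases hck : c = k
        · simp [hck]
        · simp [hck, Ne.symm hck]

lemma pvOkOf (l : List String) : ∀ (c : String),
    (∀ i < l.length,
      (l.getD i "" ≠ "" ∧ PySem.Str.isIn ":" (l.getD i "") = false) →
      (∃ j < i, PySem.Str.isIn ":" (l.getD j "") = true ∧ pvHdr (l.getD j "") ∈ pvKeys ∧
          ∀ k < i, j < k → PySem.Str.isIn ":" (l.getD k "") = false)
        ∨ (c ∈ pvKeys ∧ ∀ k < i, PySem.Str.isIn ":" (l.getD k "") = false)) →
    pvOk c l := by
  induction l with
  | nil => intro c _; trivial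
  | cons x xs ih =>
    intro c H
    by_cases hx : PySem.Str.isIn ":" x = true
    · simp only [pvOk, hx, if_true]
      refine ih (pvHdr x) (fun i hi hdata => ?_)
      have := H (i + 1) (by simpa using Nat.succ_lt_succ hi) (by simpa using hdata)
      rcases this with ⟨j, hj, hjh, hjk, hclean⟩ | ⟨_, hclean⟩
      · rcases Nat.eq_zero_or_pos j with hj0 | hjp
        · subst hj0
          right
          refine ⟨by simpa using hjk, fun k hk => ?_⟩
          simpa using hclean (k + 1) (by omega) (by omega)
        · left
          obtain ⟨j', rfl⟩ := Nat.exists_eq_add_of_lt hjp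
          rw [Nat.zero_add] at *
          refine ⟨j', by omega, by simpa using hjh, by simpa using hjk, fun k hk1 hk2 => ?_⟩
          simpa using hclean (k + 1) (by omega) (by omega)
      · exact absurd (hclean 0 (Nat.succ_pos i)) (by simpa using hx)
    · have hx' : PySem.Str.isIn ":" x = false := by simpa using hx
      have hshift : ∀ i < xs.length,
          (xs.getD i "" ≠ "" ∧ PySem.Str.isIn ":" (xs.getD i "") = false) →
          (∃ j < i, PySem.Str.isIn ":" (xs.getD j "") = true ∧ pvHdr (xs.getD j "") ∈ pvKeys ∧
              ∀ k < i, j < k → PySem.Str.isIn ":" (xs.getD k "") = false)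
            ∨ (c ∈ pvKeys ∧ ∀ k < i, PySem.Str.isIn ":" (xs.getD k "") = false) := by
        intro i hi hdata
        have := H (i + 1) (by simpa using Nat.succ_lt_succ hi) (by simpa using hdata)
        rcases this with ⟨j, hj, hjh, hjk, hclean⟩ | ⟨hc, hclean⟩
        · rcases Nat.eq_zero_or_pos j with hj0 | hjp
          · subst hj0
            have hx2 : PySem.Chars.isIn [':'] x.toList = false := by simpa using hx'
            exact absurd (by simpa using hjh) (by simp [hx2])
          · left
            obtain ⟨j', rfl⟩ := Nat.exists_eq_add_of_lt hjp
            rw [Nat.zero_add] at *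
            refine ⟨j', by omega, by simpa using hjh, by simpa using hjk, fun k hk1 hk2 => ?_⟩
            simpa using hclean (k + 1) (by omega) (by omega)
        · right
          refine ⟨hc, fun k hk => ?_⟩
          simpa using hclean (k + 1) (by omega)
      by_cases hxe : x = ""
      · subst hxe
        simp only [pvOk, hx', Bool.false_eq_true, if_false, if_pos rfl]
        exact ih c hshift
      · simp only [pvOk, hx', Bool.false_eq_true, if_false, if_neg hxe]
        have h0 := H 0 (by simp) ⟨hxe, by simpa using hx'⟩
        rcases h0 with ⟨j, hj, _⟩ | ⟨hc, _⟩
        · omega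
        · exact ⟨hc, ih c hshift⟩

lemma pvDictInit :
    PySem.Dict.ofList (pvKeys.map (fun k => (k, ([] : List (List String)))))
      = PySem.Dict.mk (pvKeys.map (fun k => (k, ([] : List (List String))))) := by
  decide

-- ===== VERDICT (by name: the statement is the Claim_ definition above) =====
theorem map_const_spec : Claim_equal_map_const := by
  intro f _ hpre
  show _root_.map_const f = map_const_alt f
  unfold _root_.map_const map_const_alt
  rw [PySem.List.slice_from f (by norm_num)]
  show ((List.foldl pvStepA _ _).2).items = _
  have hdrop : (2 : Int).toNat = 2 := rfl
  rw [hdrop]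
  have hok : pvOk "" (f.drop 2) := by
    refine pvOkOf (f.drop 2) "" (fun i hi hdata => ?_)
    exact Or.inl (hpre i hi hdata)
  rw [pvDictInit,
      pvInvA (f.drop 2) "" (fun _ => ([] : List (List String))) hok,
      pvTagB (f.drop 2) "" []]
  simp [pvRows]
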